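-- pv_equiv track=rewrite | github.com/Dimau/algorithmic_tasks | 3_5_max_number_of_prizes.py | greedy_get_max_number_of_prizes
-- ===== SOURCE A (Python) =====
-- def greedy_get_max_number_of_prizes(n):
--     prizes_list = [1]
--     residue = n - 1
--     last_prize = 1
--     while last_prize + 1 <= residue:
--         last_prize += 1
--         prizes_list.append(last_prize)
--         residue -= last_prize
--     else:
--         prizes_list[len(prizes_list) - 1] += residue
--     return len(prizes_list), prizes_list
-- ===== SOURCE B (Python) =====
-- import math
--
-- def greedy_get_max_number_of_prizes(n):
--     if n <= 2:
--         return 1, [n]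
--     k = (math.isqrt(8 * n + 1) - 1) // 2  # largest k with k*(k+1)//2 <= n
--     prizes = list(range(1, k + 1))
--     prizes[-1] += n - k * (k + 1) // 2
--     return len(prizes), prizes
-- ===== Notes on version B (the rewrite author's own statement) =====
-- stated objective: simpler
-- what changed: Replaces A's greedy while-loop (append 2,3,... while the residue allows) by the closed form k = (isqrt(8n+1)-1)//2 for the number of prizes, building the list with one range call and adding the remainder to the last element; the degenerate small inputs are handled up front.
import Mathlib
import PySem

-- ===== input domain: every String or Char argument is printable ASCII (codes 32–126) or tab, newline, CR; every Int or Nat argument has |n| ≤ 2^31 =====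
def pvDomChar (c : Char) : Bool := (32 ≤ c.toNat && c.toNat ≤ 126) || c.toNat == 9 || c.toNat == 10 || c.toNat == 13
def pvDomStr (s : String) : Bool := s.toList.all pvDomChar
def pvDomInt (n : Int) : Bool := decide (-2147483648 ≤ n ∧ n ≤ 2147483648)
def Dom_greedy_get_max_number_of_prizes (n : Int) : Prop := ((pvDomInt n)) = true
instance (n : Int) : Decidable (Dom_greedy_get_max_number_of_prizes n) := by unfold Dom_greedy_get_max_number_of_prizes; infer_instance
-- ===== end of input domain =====

-- B replaces A's greedy while-loop by a closed-form count k = (isqrt(8n+1)-1)//2 plus one range;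
-- objective: simpler (arithmetic + one range instead of a loop building list state).

-- ===== PORT A =====
-- the while-loop of A; `hlast` only justifies termination (last_prize starts at 1 and only grows)
def pvLoopA (prizes : List Int) (last residue : Int) (hlast : 1 ≤ last) : List Int :=
  if h : last + 1 ≤ residue then
    pvLoopA (prizes ++ [last + 1]) (last + 1) (residue - (last + 1)) (by omega)
  else
    -- else-branch: prizes_list[len(prizes_list) - 1] += residue
    prizes.set (prizes.length - 1) (prizes.getD (prizes.length - 1) 0 + residue)
termination_by residue.toNat
decreasing_by omega

def greedy_get_max_number_of_prizes (n : Int) : Int × List Int :=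
  let prizes := pvLoopA [1] 1 (n - 1) (le_refl 1)
  ((prizes.length : Int), prizes)

-- ===== PORT B =====
-- math.isqrt(m) ported as Nat.sqrt m.toNat; exact on the nonnegative arguments B passes it
def greedy_get_max_number_of_prizes_alt (n : Int) : Int × List Int :=
  if n ≤ 2 then (1, [n])
  else
    let k := PySem.Int.floordiv ((Nat.sqrt (8 * n + 1).toNat : Int) - 1) 2
    let prizes := PySem.List.pyRange 1 (k + 1) 1
    -- prizes[-1] += n - k*(k+1)//2   (prizes is nonempty, index -1 is the last slot)
    let prizes2 := prizes.set (prizes.length - 1)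
      (prizes.getD (prizes.length - 1) 0 + (n - PySem.Int.floordiv (k * (k + 1)) 2))
    ((prizes2.length : Int), prizes2)

-- ===== PRECONDITION & SPEC =====
def Spec_greedy_get_max_number_of_prizes (n : Int) (out : Int × List Int) : Prop := out = greedy_get_max_number_of_prizes_alt n
instance (n : Int) (out : Int × List Int) : Decidable (Spec_greedy_get_max_number_of_prizes n out) := by unfold Spec_greedy_get_max_number_of_prizes; infer_instance

-- ===== CLAIM (what is proved, stated in full; the proofs are below) =====
def Claim_equal_greedy_get_max_number_of_prizes : Prop := ∀ (n : Int), Dom_greedy_get_max_number_of_prizes n → Spec_greedy_get_max_number_of_prizes n (greedy_get_max_number_of_prizes n)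

-- ===== LEMMAS AND PROOFS =====

lemma pv_set_last_append (xs : List Int) (a v : Int) :
    (xs ++ [a]).set xs.length v = xs ++ [v] := by
  induction xs with
  | nil => simp
  | cons x xs ih => simp [ih]

lemma pv_getD_last_append (xs : List Int) (a : Int) :
    (xs ++ [a]).getD xs.length 0 = a := by
  induction xs with
  | nil => simp
  | cons x xs ih => simp

lemma pv_two_dvd_mul_succ (j : Int) : 2 * (j * (j + 1) / 2) = j * (j + 1) :=
  Int.mul_ediv_cancel' (Int.even_mul_succ_self j).two_dvd

-- the loop, started at state ([1..j], j, n - T j) with j ≤ k, ends as [1..k-1] ++ [k + (n - T k)]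
lemma pvLoopA_spec (n k : Int) (hlo : k * (k + 1) ≤ 2 * n) (hhi : 2 * n < (k + 1) * (k + 2)) :
    ∀ (d : Nat) (j : Int) (hj : 1 ≤ j), k = j + (d : Int) →
      pvLoopA (PySem.List.pyRange 1 (j + 1) 1) j (n - j * (j + 1) / 2) hj =
        PySem.List.pyRange 1 k 1 ++ [k + (n - k * (k + 1) / 2)] := by
  intro d
  induction d with
  | zero =>
    intro j hj hk
    have hjk : j = k := by omega
    subst hjk
    have h2 := pv_two_dvd_mul_succ j
    have hcond : ¬ (j + 1 ≤ n - j * (j + 1) / 2) := by nlinarith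
    rw [pvLoopA, dif_neg hcond]
    rw [PySem.List.pyRange_one_succ_right (by omega)]
    have hlen : (PySem.List.pyRange 1 j 1 ++ [j]).length - 1
        = (PySem.List.pyRange 1 j 1).length := by
      simp [List.length_append]
    rw [hlen, pv_getD_last_append, pv_set_last_append]
  | succ d ih =>
    intro j hj hk
    have h2j := pv_two_dvd_mul_succ j
    have h2j1 := pv_two_dvd_mul_succ (j + 1)
    have hmono : (j + 1) * (j + 1 + 1) ≤ k * (k + 1) := by
      have hjk : j + 1 ≤ k := by omega
      exact mul_le_mul hjk (by omega) (by omega) (by omega)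
    have hcond : j + 1 ≤ n - j * (j + 1) / 2 := by nlinarith
    rw [pvLoopA, dif_pos hcond]
    have harg : n - j * (j + 1) / 2 - (j + 1) = n - (j + 1) * (j + 1 + 1) / 2 := by
      have hq : (j + 1) * (j + 1 + 1) = j * (j + 1) + 2 * (j + 1) := by ring
      omega
    rw [← PySem.List.pyRange_one_succ_right (by omega : (1:Int) ≤ j + 1), harg]
    exact ih (j + 1) (by omega) (by push_cast at hk ⊢; omega)

-- the closed-form k of B satisfies the greedy bounds
lemma pv_k_bounds (n : Int) (hn : 3 ≤ n) :
    let k := PySem.Int.floordiv ((Nat.sqrt (8 * n + 1).toNat : Int) - 1) 2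
    2 ≤ k ∧ k * (k + 1) ≤ 2 * n ∧ 2 * n < (k + 1) * (k + 2) := by
  intro k
  set s : Nat := Nat.sqrt (8 * n + 1).toNat with hs
  have hm : ((8 * n + 1).toNat : Int) = 8 * n + 1 := by omega
  have hsq : (s : Int) * s ≤ 8 * n + 1 := by
    have h := Nat.sqrt_le (8 * n + 1).toNat
    have h' : ((Nat.sqrt (8 * n + 1).toNat * Nat.sqrt (8 * n + 1).toNat : Nat) : Int)
        ≤ ((8 * n + 1).toNat : Int) := by exact_mod_cast h
    rw [hs]; push_cast at h'; omega
  have hsq2 : 8 * n + 1 < ((s : Int) + 1) * ((s : Int) + 1) := by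
    have h := Nat.lt_succ_sqrt (8 * n + 1).toNat
    have h' : ((8 * n + 1).toNat : Int)
        < ((Nat.succ (Nat.sqrt (8 * n + 1).toNat) * Nat.succ (Nat.sqrt (8 * n + 1).toNat) : Nat) : Int) := by
      exact_mod_cast h
    rw [hs]; push_cast at h'; omega
  have hs5 : 5 ≤ (s : Int) := by
    by_contra h
    have : (s : Int) + 1 ≤ 5 := by omega
    nlinarith
  have hkdef : k = ((s : Int) - 1) / 2 := by
    show PySem.Int.floordiv _ 2 = _
    rw [PySem.Int.floordiv_eq_ediv_of_pos (by omega)]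
  have hk1 : 2 * k ≤ (s : Int) - 1 ∧ (s : Int) - 1 < 2 * k + 2 := by
    constructor <;> omega
  refine ⟨by omega, ?_, ?_⟩
  · nlinarith
  · nlinarith

lemma pv_lists_eq (n : Int) (hn : ¬ n ≤ 2) :
    pvLoopA [1] 1 (n - 1) (le_refl 1) =
      (PySem.List.pyRange 1
          (PySem.Int.floordiv ((Nat.sqrt (8 * n + 1).toNat : Int) - 1) 2 + 1) 1).set
        ((PySem.List.pyRange 1
          (PySem.Int.floordiv ((Nat.sqrt (8 * n + 1).toNat : Int) - 1) 2 + 1) 1).length - 1)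
        ((PySem.List.pyRange 1
          (PySem.Int.floordiv ((Nat.sqrt (8 * n + 1).toNat : Int) - 1) 2 + 1) 1).getD
          ((PySem.List.pyRange 1
            (PySem.Int.floordiv ((Nat.sqrt (8 * n + 1).toNat : Int) - 1) 2 + 1) 1).length - 1) 0
          + (n - PySem.Int.floordiv
              (PySem.Int.floordiv ((Nat.sqrt (8 * n + 1).toNat : Int) - 1) 2 *
                (PySem.Int.floordiv ((Nat.sqrt (8 * n + 1).toNat : Int) - 1) 2 + 1)) 2)) := by
  obtain ⟨hk2, hlo, hhi⟩ := pv_k_bounds n (by omega)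
  set k := PySem.Int.floordiv ((Nat.sqrt (8 * n + 1).toNat : Int) - 1) 2 with hk
  -- left side = closed form, via the loop lemma started at j = 1
  have hstart : ([1] : List Int) = PySem.List.pyRange 1 (1 + 1) 1 := by
    rw [PySem.List.pyRange_one_singleton]
  have hres : n - 1 = n - 1 * (1 + 1) / 2 := by norm_num
  have hL : pvLoopA [1] 1 (n - 1) (le_refl 1)
      = PySem.List.pyRange 1 k 1 ++ [k + (n - k * (k + 1) / 2)] := by
    rw [hstart]
    have := pvLoopA_spec n k hlo hhi (k - 1).toNat 1 (le_refl 1) (by omega)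
    rw [hres]
    exact this
  rw [hL]
  -- right side: same list
  rw [PySem.List.pyRange_one_succ_right (by omega : (1:Int) ≤ k)]
  have hlen : (PySem.List.pyRange 1 k 1 ++ [k]).length - 1
      = (PySem.List.pyRange 1 k 1).length := by
    simp [List.length_append]
  rw [hlen, pv_getD_last_append, pv_set_last_append,
    PySem.Int.floordiv_eq_ediv_of_pos (by omega : (0:Int) < 2)]

-- ===== VERDICT (by name: the statement is the Claim_ definition above) =====
theorem greedy_get_max_number_of_prizes_spec : Claim_equal_greedy_get_max_number_of_prizes := by
  intro n _
  unfold Spec_greedy_get_max_number_of_prizes greedy_get_max_number_of_prizes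
    greedy_get_max_number_of_prizes_alt
  by_cases hn : n ≤ 2
  · rw [if_pos hn]
    rw [pvLoopA, dif_neg (by omega : ¬ (1 + 1 ≤ n - 1))]
    simp
  · rw [if_neg hn]
    have h := pv_lists_eq n hn
    simp only [h]
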